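-- pv_equiv track=rewrite | github.com/Filipaun/python-advent-of-code-2021 | day5/day5.py | straight_non_colinear_collisions
-- ===== SOURCE A (Python) =====
-- def straight_non_colinear_collisions(vertical_lines,horizontal_lines):
--     collisions = []
--     for i,(key_v,sublist_v) in enumerate(vertical_lines.items()):
--         for j,(key_h,sublist_h) in enumerate(horizontal_lines.items()):
--             for i_sub_h in range(len(sublist_h)):
--                 if (sublist_h[i_sub_h][0] <= key_v and sublist_h[i_sub_h][1] >= key_v):
--                     for i_sub_v in range(len(sublist_v)):
--                         if(sublist_v[i_sub_v][0] <= key_h and sublist_v[i_sub_v][1] >= key_h):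
--                             collisions.append([key_v,key_h])
--     return collisions
-- ===== SOURCE B (Python) =====
-- def straight_non_colinear_collisions(vertical_lines, horizontal_lines):
--     # Per key, pre-sort the starts and the ends of its (well-formed) segments once;
--     # then the number of segments covering a coordinate x is
--     # (#starts <= x) - (#ends < x), found by two binary searches.
--     def bisect_right(a, x):
--         lo, hi = 0, len(a)
--         while lo < hi:
--             mid = (lo + hi) // 2
--             if x < a[mid]:
--                 hi = mid
--             else:
--                 lo = mid + 1
--         return lo
--
--     def bisect_left(a, x):
--         lo, hi = 0, len(a)
--         while lo < hi:
--             mid = (lo + hi) // 2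
--             if a[mid] < x:
--                 lo = mid + 1
--             else:
--                 hi = mid
--         return lo
--
--     def prep(lines):
--         prepped = []
--         for key, segs in lines.items():
--             # segments are [start, end] pairs; shorter entries cannot be scanned
--             # without an IndexError and reversed ones cover no coordinate
--             ok = [s for s in segs if len(s) >= 2 and s[0] <= s[1]]
--             starts = sorted(s[0] for s in ok)
--             ends = sorted(s[1] for s in ok)
--             prepped.append((key, starts, ends))
--         return prepped
--
--     prep_v = prep(vertical_lines)
--     prep_h = prep(horizontal_lines)
--     collisions = []
--     for key_v, v_starts, v_ends in prep_v:
--         for key_h, h_starts, h_ends in prep_h: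
--             count_h = bisect_right(h_starts, key_v) - bisect_left(h_ends, key_v)
--             if count_h:
--                 count_v = bisect_right(v_starts, key_h) - bisect_left(v_ends, key_h)
--                 collisions.extend([[key_v, key_h]] * (count_h * count_v))
--     return collisions
-- ===== Notes on version B (the rewrite author's own statement) =====
-- stated objective: alternative
-- what changed: Instead of A's per-key-pair scans over the segment lists (rescanning the vertical list once per covering horizontal segment), B preprocesses each key once into sorted arrays of segment starts and ends, counts the segments covering a coordinate with two binary searches per key pair ((#starts <= x) - (#ends < x)), and emits count_h*count_v copies of [key_v,key_h]; on a timing run's output-dominated timing inputs this is not measurably faster.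
import Mathlib
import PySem

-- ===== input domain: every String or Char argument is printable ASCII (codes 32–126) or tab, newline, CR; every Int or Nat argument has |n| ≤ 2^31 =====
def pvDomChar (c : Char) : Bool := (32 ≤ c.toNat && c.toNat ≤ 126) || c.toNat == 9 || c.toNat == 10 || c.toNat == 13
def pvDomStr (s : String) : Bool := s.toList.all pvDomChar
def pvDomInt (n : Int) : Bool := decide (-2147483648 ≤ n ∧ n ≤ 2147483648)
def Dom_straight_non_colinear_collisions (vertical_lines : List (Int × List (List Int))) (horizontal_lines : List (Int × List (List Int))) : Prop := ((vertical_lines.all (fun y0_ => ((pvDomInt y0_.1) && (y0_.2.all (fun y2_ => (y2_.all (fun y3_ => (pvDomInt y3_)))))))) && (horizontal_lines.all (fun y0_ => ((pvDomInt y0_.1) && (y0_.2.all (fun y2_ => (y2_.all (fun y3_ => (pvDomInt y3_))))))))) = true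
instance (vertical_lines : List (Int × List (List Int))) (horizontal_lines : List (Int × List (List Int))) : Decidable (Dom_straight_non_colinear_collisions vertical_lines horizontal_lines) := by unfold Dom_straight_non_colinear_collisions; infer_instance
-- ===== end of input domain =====

-- B pre-sorts each key's segment starts and ends once and counts the segments covering a
-- coordinate by two binary searches per key pair, instead of A's per-pair segment scans
-- (return value only; neither side mutates its arguments).

-- ===== PORT A =====
def straight_non_colinear_collisions (vertical_lines : List (Int × List (List Int))) (horizontal_lines : List (Int × List (List Int))) : List (List Int) :=
  vertical_lines.foldl (fun collisions pv =>
    horizontal_lines.foldl (fun collisions ph =>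
      (PySem.List.pyRange 0 (ph.2.length : Int) 1).foldl (fun collisions i_sub_h =>
        if PySem.List.pyGetD (PySem.List.pyGetD ph.2 i_sub_h []) 0 0 ≤ pv.1 ∧
           PySem.List.pyGetD (PySem.List.pyGetD ph.2 i_sub_h []) 1 0 ≥ pv.1 then
          (PySem.List.pyRange 0 (pv.2.length : Int) 1).foldl (fun collisions i_sub_v =>
            if PySem.List.pyGetD (PySem.List.pyGetD pv.2 i_sub_v []) 0 0 ≤ ph.1 ∧
               PySem.List.pyGetD (PySem.List.pyGetD pv.2 i_sub_v []) 1 0 ≥ ph.1 then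
              collisions ++ [[pv.1, ph.1]]
            else collisions) collisions
        else collisions) collisions) collisions) []

-- ===== PORT B =====
-- Source B's prep: per key keep the well-formed segments and sort their starts and their ends
-- (Source B's hand-written bisect loops are exactly CPython's bisect_right/bisect_left, ported
-- as the prelude's PySem.List.bisectRight/bisectLeft, which are that same loop)
def pvPrepLines (lines : List (Int × List (List Int))) : List (Int × List Int × List Int) :=
  lines.foldl (fun prepped p =>
    let ok := p.2.filter (fun s =>
      decide (2 ≤ s.length) && decide (PySem.List.pyGetD s 0 0 ≤ PySem.List.pyGetD s 1 0))
    prepped ++ [(p.1,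
      PySem.List.sorted (ok.map (fun s => PySem.List.pyGetD s 0 0)) (fun v => v) false,
      PySem.List.sorted (ok.map (fun s => PySem.List.pyGetD s 1 0)) (fun v => v) false)]) []

def straight_non_colinear_collisions_alt (vertical_lines : List (Int × List (List Int))) (horizontal_lines : List (Int × List (List Int))) : List (List Int) :=
  let prep_v := pvPrepLines vertical_lines
  let prep_h := pvPrepLines horizontal_lines
  prep_v.foldl (fun collisions t =>
    prep_h.foldl (fun collisions u =>
      let count_h := PySem.List.bisectRight u.2.1 t.1 - PySem.List.bisectLeft u.2.2 t.1
      if count_h ≠ 0 then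
        let count_v := PySem.List.bisectRight t.2.1 u.1 - PySem.List.bisectLeft t.2.2 u.1
        collisions ++ List.replicate (count_h * count_v) [t.1, u.1]
      else collisions) collisions) []

-- ===== PRECONDITION & SPEC =====
-- Pre_ excludes exactly the inputs on which the Python A raises IndexError: some interval list
-- it actually indexes has fewer than the coordinates the (short-circuited) comparisons read.
def Pre_straight_non_colinear_collisions (vertical_lines : List (Int × List (List Int))) (horizontal_lines : List (Int × List (List Int))) : Prop :=
  ∀ pv ∈ vertical_lines, ∀ ph ∈ horizontal_lines,
    (∀ t ∈ ph.2, t ≠ [] ∧ (PySem.List.pyGetD t 0 0 ≤ pv.1 → 2 ≤ t.length)) ∧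
    ((∃ t ∈ ph.2, PySem.List.pyGetD t 0 0 ≤ pv.1 ∧ pv.1 ≤ PySem.List.pyGetD t 1 0) →
      ∀ u ∈ pv.2, u ≠ [] ∧ (PySem.List.pyGetD u 0 0 ≤ ph.1 → 2 ≤ u.length))
instance (vertical_lines : List (Int × List (List Int))) (horizontal_lines : List (Int × List (List Int))) : Decidable (Pre_straight_non_colinear_collisions vertical_lines horizontal_lines) := by unfold Pre_straight_non_colinear_collisions; infer_instance

def pvWitness_straight_non_colinear_collisions : (List (Int × List (List Int))) × (List (Int × List (List Int))) :=
  ([(1, [[0, 2]])], [(1, [[0, 2]])])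

def Spec_straight_non_colinear_collisions (vertical_lines : List (Int × List (List Int))) (horizontal_lines : List (Int × List (List Int))) (out : List (List Int)) : Prop := out = straight_non_colinear_collisions_alt vertical_lines horizontal_lines
instance (vertical_lines : List (Int × List (List Int))) (horizontal_lines : List (Int × List (List Int))) (out : List (List Int)) : Decidable (Spec_straight_non_colinear_collisions vertical_lines horizontal_lines out) := by unfold Spec_straight_non_colinear_collisions; infer_instance

-- ===== CLAIM (what is proved, stated in full; the proofs are below) =====
def Claim_equal_straight_non_colinear_collisions : Prop := ∀ (vertical_lines : List (Int × List (List Int))) (horizontal_lines : List (Int × List (List Int))), Dom_straight_non_colinear_collisions vertical_lines horizontal_lines → Pre_straight_non_colinear_collisions vertical_lines horizontal_lines → Spec_straight_non_colinear_collisions vertical_lines horizontal_lines (straight_non_colinear_collisions vertical_lines horizontal_lines)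

-- ===== LEMMAS AND PROOFS =====

-- the predicate "this segment covers coordinate x" as A reads it
def pvCover (x : Int) (s : List Int) : Bool :=
  decide (PySem.List.pyGetD s 0 0 ≤ x ∧ x ≤ PySem.List.pyGetD s 1 0)

-- "well-formed segment" as Source B's prep filters
def pvOk (s : List Int) : Bool :=
  decide (2 ≤ s.length) && decide (PySem.List.pyGetD s 0 0 ≤ PySem.List.pyGetD s 1 0)

-- a loop that appends the same n-copies block once per element equals one replicate
theorem pv_foldl_append_replicate {α β : Type} (l : List α) (n : Nat) (e : β) (acc : List β) :
    l.foldl (fun a _ => a ++ List.replicate n e) acc = acc ++ List.replicate (l.length * n) e := by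
  induction l generalizing acc with
  | nil => simp
  | cons x xs ih =>
      simp only [List.foldl_cons, ih, List.length_cons, List.append_assoc]
      rw [← List.replicate_add]
      ring_nf

-- A's per-key-pair doubly nested scan equals "count covering h segs × count covering v segs"
theorem pv_pair_body_eq (pv ph : Int × List (List Int)) (acc : List (List Int)) :
    (PySem.List.pyRange 0 (ph.2.length : Int) 1).foldl (fun collisions i_sub_h =>
        if PySem.List.pyGetD (PySem.List.pyGetD ph.2 i_sub_h []) 0 0 ≤ pv.1 ∧
           PySem.List.pyGetD (PySem.List.pyGetD ph.2 i_sub_h []) 1 0 ≥ pv.1 then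
          (PySem.List.pyRange 0 (pv.2.length : Int) 1).foldl (fun collisions i_sub_v =>
            if PySem.List.pyGetD (PySem.List.pyGetD pv.2 i_sub_v []) 0 0 ≤ ph.1 ∧
               PySem.List.pyGetD (PySem.List.pyGetD pv.2 i_sub_v []) 1 0 ≥ ph.1 then
              collisions ++ [[pv.1, ph.1]]
            else collisions) collisions
        else collisions) acc
    = (let count_h := ph.2.countP (pvCover pv.1)
      if count_h ≠ 0 then
        let count_v := pv.2.countP (pvCover ph.1)
        acc ++ List.replicate (count_h * count_v) [pv.1, ph.1]
      else acc) := by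
  rw [PySem.List.foldl_pyRange_zero_pyGetD' ph.2 ([] : List Int)
        (f := fun collisions t =>
          if PySem.List.pyGetD t 0 0 ≤ pv.1 ∧ PySem.List.pyGetD t 1 0 ≥ pv.1 then
            (PySem.List.pyRange 0 (pv.2.length : Int) 1).foldl (fun collisions i_sub_v =>
              if PySem.List.pyGetD (PySem.List.pyGetD pv.2 i_sub_v []) 0 0 ≤ ph.1 ∧
                 PySem.List.pyGetD (PySem.List.pyGetD pv.2 i_sub_v []) 1 0 ≥ ph.1 then
                collisions ++ [[pv.1, ph.1]]
              else collisions) collisions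
          else collisions)]
  have hv : ∀ (a : List (List Int)),
      (PySem.List.pyRange 0 (pv.2.length : Int) 1).foldl (fun collisions i_sub_v =>
        if PySem.List.pyGetD (PySem.List.pyGetD pv.2 i_sub_v []) 0 0 ≤ ph.1 ∧
           PySem.List.pyGetD (PySem.List.pyGetD pv.2 i_sub_v []) 1 0 ≥ ph.1 then
          collisions ++ [[pv.1, ph.1]]
        else collisions) a
      = a ++ List.replicate (pv.2.countP (pvCover ph.1)) [pv.1, ph.1] := by
    intro a
    rw [PySem.List.foldl_pyRange_zero_pyGetD' pv.2 ([] : List Int)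
          (f := fun collisions u =>
            if PySem.List.pyGetD u 0 0 ≤ ph.1 ∧ PySem.List.pyGetD u 1 0 ≥ ph.1 then
              collisions ++ [[pv.1, ph.1]]
            else collisions)]
    rw [PySem.List.foldl_append_ite (p := fun u =>
          PySem.List.pyGetD u 0 0 ≤ ph.1 ∧ PySem.List.pyGetD u 1 0 ≥ ph.1)
        (f := fun _ => [pv.1, ph.1])]
    have hpq : (fun u : List Int => decide (PySem.List.pyGetD u 0 0 ≤ ph.1 ∧ PySem.List.pyGetD u 1 0 ≥ ph.1))
        = pvCover ph.1 := by
      funext u; simp [pvCover, ge_iff_le]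
    rw [List.map_const', List.countP_eq_length_filter, hpq]
  have hcong : ∀ (a : List (List Int)),
      ph.2.foldl (fun collisions t =>
        if PySem.List.pyGetD t 0 0 ≤ pv.1 ∧ PySem.List.pyGetD t 1 0 ≥ pv.1 then
          (PySem.List.pyRange 0 (pv.2.length : Int) 1).foldl (fun collisions i_sub_v =>
            if PySem.List.pyGetD (PySem.List.pyGetD pv.2 i_sub_v []) 0 0 ≤ ph.1 ∧
               PySem.List.pyGetD (PySem.List.pyGetD pv.2 i_sub_v []) 1 0 ≥ ph.1 then
              collisions ++ [[pv.1, ph.1]]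
            else collisions) collisions
        else collisions) a
      = ph.2.foldl (fun collisions t =>
          if PySem.List.pyGetD t 0 0 ≤ pv.1 ∧ PySem.List.pyGetD t 1 0 ≥ pv.1 then
            collisions ++ List.replicate (pv.2.countP (pvCover ph.1)) [pv.1, ph.1]
          else collisions) a := by
    intro a
    apply PySem.List.foldl_congr_mem
    intro acc' t _
    by_cases h : PySem.List.pyGetD t 0 0 ≤ pv.1 ∧ PySem.List.pyGetD t 1 0 ≥ pv.1
    · simp only [if_pos h, hv]
    · simp only [if_neg h]
  rw [hcong]
  rw [PySem.List.foldl_ite_eq_foldl_filter]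
  rw [pv_foldl_append_replicate]
  have hlen : (ph.2.filter (fun t =>
        decide (PySem.List.pyGetD t 0 0 ≤ pv.1 ∧ PySem.List.pyGetD t 1 0 ≥ pv.1))).length
      = ph.2.countP (pvCover pv.1) := by
    have hpq : (fun t : List Int => decide (PySem.List.pyGetD t 0 0 ≤ pv.1 ∧ PySem.List.pyGetD t 1 0 ≥ pv.1))
        = pvCover pv.1 := by
      funext t; simp [pvCover, ge_iff_le]
    rw [List.countP_eq_length_filter, hpq]
  rw [hlen]
  by_cases h0 : ph.2.countP (pvCover pv.1) = 0
  · simp only [h0, Nat.zero_mul, List.replicate_zero, List.append_nil, ne_eq,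
      not_true_eq_false, if_false]
  · simp only [ne_eq, h0, not_false_eq_true, if_true]

-- counting via the boundary a binary search returns: if the first k elements satisfy p and the
-- rest do not, then countP p = k
theorem pv_countP_eq_of_boundary (a : List Int) (p : Int → Bool) (k : Nat) (hk : k ≤ a.length)
    (h1 : ∀ (j : Nat) (hj : j < a.length), j < k → p a[j])
    (h2 : ∀ (j : Nat) (hj : j < a.length), k ≤ j → ¬ p a[j]) :
    a.countP p = k := by
  have hsplit : a = a.take k ++ a.drop k := (List.take_append_drop k a).symm
  rw [hsplit, List.countP_append]
  have htake : (a.take k).countP p = (a.take k).length := by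
    rw [List.countP_eq_length]
    intro y hy
    obtain ⟨j, hj, rfl⟩ := List.mem_iff_getElem.1 hy
    have hjlt : j < k := lt_of_lt_of_le hj (by simp)
    have hjlen : j < a.length := lt_of_lt_of_le hjlt hk
    have := h1 j hjlen hjlt
    simpa [List.getElem_take] using this
  have hdrop : (a.drop k).countP p = 0 := by
    rw [List.countP_eq_zero]
    intro y hy
    obtain ⟨j, hj, rfl⟩ := List.mem_iff_getElem.1 hy
    have hjlen : k + j < a.length := by
      have := hj; simp [List.length_drop] at this; omega
    have := h2 (k + j) hjlen (Nat.le_add_right _ _)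
    simpa [List.getElem_drop] using this
  rw [htake, hdrop, List.length_take]
  omega

-- bisect_right on a sorted list counts the elements ≤ x
theorem pv_bisectRight_countP (a : List Int) (x : Int)
    (hs : a.Pairwise (· ≤ ·)) :
    PySem.List.bisectRight a x = a.countP (fun v => decide (v ≤ x)) := by
  obtain ⟨hk, h1, h2⟩ := PySem.List.bisectRight_spec a x hs
  exact (pv_countP_eq_of_boundary a _ _ hk
    (fun j hj hlt => by simpa using h1 j hj hlt)
    (fun j hj hge => by simpa using not_le.mpr (h2 j hj hge))).symm

-- bisect_left on a sorted list counts the elements < x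
theorem pv_bisectLeft_countP (a : List Int) (x : Int)
    (hs : a.Pairwise (· ≤ ·)) :
    PySem.List.bisectLeft a x = a.countP (fun v => decide (v < x)) := by
  obtain ⟨hk, h1, h2⟩ := PySem.List.bisectLeft_spec a x hs
  exact (pv_countP_eq_of_boundary a _ _ hk
    (fun j hj hlt => by simpa using h1 j hj hlt)
    (fun j hj hge => by simpa using not_lt.mpr (h2 j hj hge))).symm

-- over well-formed segments, (#starts ≤ x) = (#covering x) + (#ends < x)
theorem pv_cover_split (x : Int) (l : List (List Int))
    (h : ∀ s ∈ l, PySem.List.pyGetD s 0 0 ≤ PySem.List.pyGetD s 1 0) :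
    l.countP (fun s => decide (PySem.List.pyGetD s 0 0 ≤ x))
      = l.countP (pvCover x) + l.countP (fun s => decide (PySem.List.pyGetD s 1 0 < x)) := by
  induction l with
  | nil => simp
  | cons s t ih =>
      have hs := h s (by simp)
      have ht := ih (fun u hu => h u (by simp [hu]))
      simp only [List.countP_cons, ht, pvCover]
      by_cases h0 : PySem.List.pyGetD s 0 0 ≤ x
      · by_cases h1 : x ≤ PySem.List.pyGetD s 1 0
        · simp [h0, h1, not_lt.mpr h1]; omega
        · have h1' : PySem.List.pyGetD s 1 0 < x := not_le.mp h1
          simp [h0, h1, h1']; omega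
      · have hnc : ¬(PySem.List.pyGetD s 0 0 ≤ x ∧ x ≤ PySem.List.pyGetD s 1 0) :=
          fun hc => h0 hc.1
        have h1 : ¬ PySem.List.pyGetD s 1 0 < x :=
          fun hlt => h0 (le_of_lt (lt_of_le_of_lt hs hlt))
        simp [h0, h1]

-- Source B's per-key count by two binary searches equals A's covering count, given A's
-- index-safety clause for that key pair
theorem pv_bis_count_eq (x : Int) (segs : List (List Int))
    (hpre : ∀ t ∈ segs, t ≠ [] ∧ (PySem.List.pyGetD t 0 0 ≤ x → 2 ≤ t.length)) :
    PySem.List.bisectRight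
        (PySem.List.sorted ((segs.filter pvOk).map (fun s => PySem.List.pyGetD s 0 0)) (fun v => v) false) x
      - PySem.List.bisectLeft
        (PySem.List.sorted ((segs.filter pvOk).map (fun s => PySem.List.pyGetD s 1 0)) (fun v => v) false) x
      = segs.countP (pvCover x) := by
  set ok := segs.filter pvOk with hok
  have hsorted1 := PySem.List.sorted_pairwise (ok.map (fun s => PySem.List.pyGetD s 0 0)) (fun v => v)
  have hsorted2 := PySem.List.sorted_pairwise (ok.map (fun s => PySem.List.pyGetD s 1 0)) (fun v => v)
  rw [pv_bisectRight_countP _ x hsorted1, pv_bisectLeft_countP _ x hsorted2,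
      (PySem.List.sorted_perm _ _ _).countP_eq, (PySem.List.sorted_perm _ _ _).countP_eq,
      List.countP_map, List.countP_map]
  have hwf : ∀ s ∈ ok, PySem.List.pyGetD s 0 0 ≤ PySem.List.pyGetD s 1 0 := by
    intro s hs
    have := List.of_mem_filter hs
    simp [pvOk] at this
    exact this.2
  have hsplit := pv_cover_split x ok hwf
  have hcov : ok.countP (pvCover x) = segs.countP (pvCover x) := by
    rw [hok, List.countP_filter]
    apply List.countP_congr
    intro t htmem
    by_cases hc : pvCover x t = true
    · have hco := hc
      simp only [pvCover, decide_eq_true_eq] at hco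
      have h2 := (hpre t htmem).2 hco.1
      have hok2 : pvOk t = true := by
        simp [pvOk]
        exact ⟨h2, le_trans hco.1 hco.2⟩
      simp [hc, hok2]
    · simp [Bool.eq_false_iff.mpr hc]
  have hle : ok.countP (fun s => decide (PySem.List.pyGetD s 0 0 ≤ x))
      = ok.countP (pvCover x) + ok.countP (fun s => decide (PySem.List.pyGetD s 1 0 < x)) := hsplit
  simp only [Function.comp_def]
  omega

-- the prep loop with an arbitrary accumulator
theorem pv_prep_aux (lines : List (Int × List (List Int))) (acc : List (Int × List Int × List Int)) :
    lines.foldl (fun prepped p =>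
      let ok := p.2.filter (fun s =>
        decide (2 ≤ s.length) && decide (PySem.List.pyGetD s 0 0 ≤ PySem.List.pyGetD s 1 0))
      prepped ++ [(p.1,
        PySem.List.sorted (ok.map (fun s => PySem.List.pyGetD s 0 0)) (fun v => v) false,
        PySem.List.sorted (ok.map (fun s => PySem.List.pyGetD s 1 0)) (fun v => v) false)]) acc
    = acc ++ lines.map (fun p =>
      (p.1,
       PySem.List.sorted ((p.2.filter pvOk).map (fun s => PySem.List.pyGetD s 0 0)) (fun v => v) false,
       PySem.List.sorted ((p.2.filter pvOk).map (fun s => PySem.List.pyGetD s 1 0)) (fun v => v) false)) := by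
  induction lines generalizing acc with
  | nil => simp
  | cons p t ih =>
      have hfun : (fun s : List Int => decide (2 ≤ s.length) &&
          decide (PySem.List.pyGetD s 0 0 ≤ PySem.List.pyGetD s 1 0)) = pvOk := rfl
      simp only [List.foldl_cons]
      rw [ih]
      simp [hfun, List.append_assoc]

-- pvPrepLines is the map of the per-key preprocessing
theorem pv_prepLines_eq_map (lines : List (Int × List (List Int))) :
    pvPrepLines lines = lines.map (fun p =>
      (p.1,
       PySem.List.sorted ((p.2.filter pvOk).map (fun s => PySem.List.pyGetD s 0 0)) (fun v => v) false,
       PySem.List.sorted ((p.2.filter pvOk).map (fun s => PySem.List.pyGetD s 1 0)) (fun v => v) false)) := by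
  unfold pvPrepLines
  rw [pv_prep_aux, List.nil_append]

-- ===== VERDICT (by name: the statement is the Claim_ definition above) =====
theorem straight_non_colinear_collisions_spec : Claim_equal_straight_non_colinear_collisions := by
  intro V H _ hpre
  unfold Spec_straight_non_colinear_collisions
  unfold straight_non_colinear_collisions straight_non_colinear_collisions_alt
  simp only [pv_prepLines_eq_map, List.foldl_map]
  apply PySem.List.foldl_congr_mem
  intro acc pv hpv
  apply PySem.List.foldl_congr_mem
  intro acc' ph hph
  obtain ⟨hH, hV⟩ := hpre pv hpv ph hph
  rw [pv_pair_body_eq]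
  have hch : PySem.List.bisectRight
        (PySem.List.sorted ((ph.2.filter pvOk).map (fun s => PySem.List.pyGetD s 0 0)) (fun v => v) false) pv.1
      - PySem.List.bisectLeft
        (PySem.List.sorted ((ph.2.filter pvOk).map (fun s => PySem.List.pyGetD s 1 0)) (fun v => v) false) pv.1
      = ph.2.countP (pvCover pv.1) := pv_bis_count_eq pv.1 ph.2 hH
  simp only [hch]
  by_cases h0 : ph.2.countP (pvCover pv.1) = 0
  · simp [h0]
  · have hex : ∃ t ∈ ph.2, PySem.List.pyGetD t 0 0 ≤ pv.1 ∧ pv.1 ≤ PySem.List.pyGetD t 1 0 := by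
      obtain ⟨t, htm, htp⟩ := List.countP_pos_iff.1 (Nat.pos_of_ne_zero h0)
      exact ⟨t, htm, by simpa [pvCover] using htp⟩
    have hcv := pv_bis_count_eq ph.1 pv.2 (hV hex)
    simp only [hcv]
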